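-- pv_equiv track=rewrite | github.com/sykwon/sigmod2025like | src/E2E/util.py | canonicalize_like_query
-- ===== SOURCE A (Python) =====
-- def parse_like_query(qry, split_beta=False):
--     parsed = []
--     curr = qry[0]
--     is_wild = (curr == '_' or curr == '%')
--     for ch in qry[1:]:
--         if ch == '_' or ch == '%':
--             if is_wild:
--                 curr += ch
--             else:
--                 parsed.append(curr)
--                 is_wild = True
--                 curr = ch
--         else:
--             if is_wild:
--                 parsed.append(curr)
--                 is_wild = False
--                 curr = ch
--             else:
--                 curr += ch
--     parsed.append(curr)
--     if split_beta:
--         parsed_bak = parsed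
--         parsed = []
--         for token in parsed_bak:
--             if '%' in token or '_' in token:
--                 parsed.append(token)
--             else:
--                 parsed.extend(list(token))
--     return parsed
--
-- def canonicalize_like_query(qry, is_last_flip=False):
--     parsed = parse_like_query(qry)
--
--     out_tokens = []
--     for token in parsed:
--         if '_' in token or '%' in token:
--             if '%' in token:
--                 new_token = '%'
--             else:
--                 new_token = ''
--             new_token += '_' * token.count('_')
--             out_tokens.append(new_token)
--         else:
--             out_tokens.append(token)
--     if is_last_flip and '%' in out_tokens[-1]:
--         out_tokens[-1] = '_' * (len(out_tokens[-1])-1) + '%'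
--     return ''.join(out_tokens)
-- ===== SOURCE B (Python) =====
-- def canonicalize_like_query(qry, is_last_flip=False):
--     # single pass with run counters: no token list, no second canonicalization pass
--     out = []
--     pct = False   # current wildcard run contains '%'
--     us = 0        # '_' count of current wildcard run
--     in_wild = False
--     for ch in qry:
--         if ch == '%':
--             pct = True
--             in_wild = True
--         elif ch == '_':
--             us += 1
--             in_wild = True
--         else:
--             if in_wild:
--                 out.append(('%' if pct else '') + '_' * us)
--                 pct = False
--                 us = 0
--                 in_wild = False
--             out.append(ch)
--     if in_wild:
--         if is_last_flip and pct:
--             out.append('_' * us + '%')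
--         else:
--             out.append(('%' if pct else '') + '_' * us)
--     return ''.join(out)
-- ===== Notes on version B (the rewrite author's own statement) =====
-- stated objective: simpler
-- what changed: Replaced A's two-phase tokenize-then-canonicalize (build a token list, then rewrite each wildcard token, then patch the last element) by one fused left-to-right pass that keeps only a has-percent flag and an underscore counter per run and emits canonical pieces directly, handling the last-flip at the final flush.
-- outside the precondition, e.g. on canonicalize_like_query('', False): A raises IndexError, B returns ''
import Mathlib
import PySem

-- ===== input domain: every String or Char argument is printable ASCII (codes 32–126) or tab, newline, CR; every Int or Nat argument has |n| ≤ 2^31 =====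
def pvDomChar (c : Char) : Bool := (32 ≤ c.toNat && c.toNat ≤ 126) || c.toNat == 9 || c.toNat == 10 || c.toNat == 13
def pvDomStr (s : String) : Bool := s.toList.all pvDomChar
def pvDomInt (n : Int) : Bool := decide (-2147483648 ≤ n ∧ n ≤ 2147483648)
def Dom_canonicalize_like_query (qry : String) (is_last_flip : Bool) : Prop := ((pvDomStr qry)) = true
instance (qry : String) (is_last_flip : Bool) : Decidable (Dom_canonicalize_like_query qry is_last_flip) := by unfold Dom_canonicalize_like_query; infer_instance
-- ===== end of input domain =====

-- B replaces A's two-phase tokenize-then-canonicalize by one fused pass with run counters (objective: simpler).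
-- ===== PORT A =====
-- tokens are represented as List Char; ''.join is String.mk of the flattened tokens (exact on this domain)

-- step of parse_like_query's for-loop, state = (parsed, is_wild, curr)
def pvStepA (st : List (List Char) × Bool × List Char) (ch : Char) :
    List (List Char) × Bool × List Char :=
  match st with
  | (parsed, is_wild, curr) =>
    if ch == '_' || ch == '%' then
      if is_wild then (parsed, is_wild, curr ++ [ch])
      else (parsed ++ [curr], true, [ch])
    else
      if is_wild then (parsed ++ [curr], false, [ch])
      else (parsed, is_wild, curr ++ [ch])

def parse_like_query (qry : String) (split_beta : Bool) : List (List Char) :=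
  match qry.toList with
  | [] => []  -- Python raises IndexError at qry[0]; excluded by Pre_
  | curr0 :: rest =>
    let st := rest.foldl pvStepA ([], (curr0 == '_' || curr0 == '%'), [curr0])
    let parsed := st.1 ++ [st.2.2]
    if split_beta then
      parsed.foldl (fun acc token =>
        if token.contains '%' || token.contains '_' then acc ++ [token]
        else acc ++ token.map (fun ch => [ch])) []
    else parsed

-- step of canonicalize_like_query's for-loop over parsed tokens
def pvCanonStep (acc : List (List Char)) (token : List Char) : List (List Char) :=
  if token.contains '_' || token.contains '%' then
    let new_token := if token.contains '%' then ['%'] else []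
    let new_token := new_token ++ List.replicate (token.count '_') '_'
    acc ++ [new_token]
  else acc ++ [token]

def canonicalize_like_query (qry : String) (is_last_flip : Bool) : String :=
  let parsed := parse_like_query qry false
  let out_tokens := parsed.foldl pvCanonStep []
  let out_tokens :=
    if is_last_flip && (out_tokens.getLastD []).contains '%' then
      out_tokens.dropLast ++ [List.replicate ((out_tokens.getLastD []).length - 1) '_' ++ ['%']]
    else out_tokens
  String.mk out_tokens.flatten

-- ===== PORT B =====
-- single fused pass, state = (out pieces, pct, us, in_wild)
def pvStepB (st : List (List Char) × Bool × Nat × Bool) (ch : Char) :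
    List (List Char) × Bool × Nat × Bool :=
  match st with
  | (out, pct, us, in_wild) =>
    if ch == '%' then (out, true, us, true)
    else if ch == '_' then (out, pct, us + 1, true)
    else if in_wild then
      (out ++ [(if pct then ['%'] else []) ++ List.replicate us '_'] ++ [[ch]], false, 0, false)
    else (out ++ [[ch]], pct, us, in_wild)

def canonicalize_like_query_alt (qry : String) (is_last_flip : Bool) : String :=
  let st := qry.toList.foldl pvStepB ([], false, 0, false)
  let out := st.1
  let pct := st.2.1
  let us := st.2.2.1
  let in_wild := st.2.2.2
  let out :=
    if in_wild then
      if is_last_flip && pct then out ++ [List.replicate us '_' ++ ['%']]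
      else out ++ [(if pct then ['%'] else []) ++ List.replicate us '_']
    else out
  String.mk out.flatten

-- ===== PRECONDITION & SPEC =====
-- Pre_ excludes only the empty string, on which Python A raises IndexError (qry[0]); B returns "" there
def Pre_canonicalize_like_query (qry : String) (is_last_flip : Bool) : Prop := qry ≠ ""
instance (qry : String) (is_last_flip : Bool) : Decidable (Pre_canonicalize_like_query qry is_last_flip) := by unfold Pre_canonicalize_like_query; infer_instance
def pvWitness_canonicalize_like_query : String × Bool := ("a%_b", true)

def Spec_canonicalize_like_query (qry : String) (is_last_flip : Bool) (out : String) : Prop := out = canonicalize_like_query_alt qry is_last_flip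
instance (qry : String) (is_last_flip : Bool) (out : String) : Decidable (Spec_canonicalize_like_query qry is_last_flip out) := by unfold Spec_canonicalize_like_query; infer_instance

-- ===== CLAIM (what is proved, stated in full; the proofs are below) =====
def Claim_equal_canonicalize_like_query : Prop := ∀ (qry : String) (is_last_flip : Bool), Dom_canonicalize_like_query qry is_last_flip → Pre_canonicalize_like_query qry is_last_flip → Spec_canonicalize_like_query qry is_last_flip (canonicalize_like_query qry is_last_flip)

-- ===== LEMMAS AND PROOFS =====
def pvWild (c : Char) : Bool := c == '_' || c == '%'

def pvCanon (token : List Char) : List Char :=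
  if token.contains '_' || token.contains '%' then
    (if token.contains '%' then ['%'] else []) ++ List.replicate (token.count '_') '_'
  else token

lemma canon_foldl (l : List (List Char)) (acc : List (List Char)) :
    l.foldl pvCanonStep acc = acc ++ l.map pvCanon := by
  induction l generalizing acc with
  | nil => simp
  | cons t l ih =>
    simp only [List.foldl_cons, List.map_cons, ih, pvCanonStep, pvCanon]
    split
    · split <;> simp
    · simp

-- reduction lemmas for the two loop steps
lemma sA_pct (p : List (List Char)) (w : Bool) (c : List Char) :
    pvStepA (p, w, c) '%' = if w then (p, w, c ++ ['%']) else (p ++ [c], true, ['%']) := by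
  cases w <;> rfl

lemma sA_us (p : List (List Char)) (w : Bool) (c : List Char) :
    pvStepA (p, w, c) '_' = if w then (p, w, c ++ ['_']) else (p ++ [c], true, ['_']) := by
  cases w <;> rfl

lemma sA_lit (p : List (List Char)) (w : Bool) (c : List Char) (ch : Char)
    (h1 : (ch == '_') = false) (h2 : (ch == '%') = false) :
    pvStepA (p, w, c) ch = if w then (p ++ [c], false, [ch]) else (p, w, c ++ [ch]) := by
  cases w <;> simp [pvStepA, h1, h2]

lemma sB_pct (o : List (List Char)) (pc : Bool) (us : Nat) (iw : Bool) :
    pvStepB (o, pc, us, iw) '%' = (o, true, us, true) := rfl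

lemma sB_us (o : List (List Char)) (pc : Bool) (us : Nat) (iw : Bool) :
    pvStepB (o, pc, us, iw) '_' = (o, pc, us + 1, true) := by
  simp [pvStepB]

lemma sB_lit (o : List (List Char)) (pc : Bool) (us : Nat) (iw : Bool) (ch : Char)
    (h1 : (ch == '_') = false) (h2 : (ch == '%') = false) :
    pvStepB (o, pc, us, iw) ch =
      if iw then (o ++ [(if pc then ['%'] else []) ++ List.replicate us '_'] ++ [[ch]], false, 0, false)
      else (o ++ [[ch]], pc, us, iw) := by
  cases iw <;> simp [pvStepB, h1, h2]

-- the joint invariant between A's tokenizer state and B's fused state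
def pvRel (sA : List (List Char) × Bool × List Char)
    (sB : List (List Char) × Bool × Nat × Bool) : Prop :=
  match sA, sB with
  | (parsed, is_wild, curr), (out, pct, us, in_wild) =>
    in_wild = is_wild ∧ curr ≠ [] ∧
    (if is_wild then
      out.flatten = (parsed.map pvCanon).flatten ∧ pct = curr.contains '%' ∧
        us = curr.count '_' ∧ curr.all pvWild = true
    else
      out.flatten = (parsed.map pvCanon).flatten ++ curr ∧ pct = false ∧ us = 0 ∧
        curr.all (fun c => !pvWild c) = true)

lemma canon_of_wild (curr : List Char) (h1 : curr ≠ []) (h2 : curr.all pvWild = true) :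
    pvCanon curr =
      (if curr.contains '%' then ['%'] else []) ++ List.replicate (curr.count '_') '_' := by
  obtain ⟨c, rest, rfl⟩ := List.exists_cons_of_ne_nil h1
  have hc : pvWild c = true := by simp [List.all_cons] at h2; exact h2.1
  unfold pvCanon
  rcases Bool.or_eq_true_iff.mp hc with h | h
  · simp [(by simpa using h : c = '_')]
  · simp [(by simpa using h : c = '%')]

lemma canon_of_lit (curr : List Char) (h2 : curr.all (fun c => !pvWild c) = true) :
    pvCanon curr = curr ∧ curr.contains '%' = false ∧ curr.contains '_' = false := by
  have h_ : '_' ∉ curr := by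
    intro hm
    have := List.all_eq_true.mp h2 _ hm
    simp [pvWild] at this
  have hp : '%' ∉ curr := by
    intro hm
    have := List.all_eq_true.mp h2 _ hm
    simp [pvWild] at this
  refine ⟨by simp [pvCanon, h_, hp], by simp [h_, hp]⟩

lemma rel_step (sA : List (List Char) × Bool × List Char)
    (sB : List (List Char) × Bool × Nat × Bool) (ch : Char)
    (h : pvRel sA sB) : pvRel (pvStepA sA ch) (pvStepB sB ch) := by
  obtain ⟨parsed, is_wild, curr⟩ := sA
  obtain ⟨out, pct, us, in_wild⟩ := sB
  by_cases hp : ch = '%'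
  · subst hp
    rw [sA_pct, sB_pct]
    cases is_wild with
    | true =>
      obtain ⟨_, hne, hout, hpct, hus, hall⟩ := h
      refine ⟨rfl, by simp, by simp [pvRel, hout], by simp [List.contains_append], ?_, ?_⟩
      · simp [List.count_append, hus]
      · simp [List.all_append, hall, pvWild]
    | false =>
      obtain ⟨_, hne, hout, hpct, hus, hall⟩ := h
      have hl := canon_of_lit curr hall
      refine ⟨rfl, by simp, ?_, by simp [List.contains_cons], by simp [hus, List.count_cons], by simp [pvWild]⟩
      simp [hout, canon_foldl, hl.1]
  · by_cases hu : ch = '_'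
    · subst hu
      rw [sA_us, sB_us]
      cases is_wild with
      | true =>
        obtain ⟨_, hne, hout, hpct, hus, hall⟩ := h
        refine ⟨rfl, by simp, by simp [pvRel, hout], ?_, ?_, ?_⟩
        · simp [List.contains_append, hpct]
        · simp [List.count_append, hus]
        · simp [List.all_append, hall, pvWild]
      | false =>
        obtain ⟨_, hne, hout, hpct, hus, hall⟩ := h
        have hl := canon_of_lit curr hall
        refine ⟨rfl, by simp, ?_, ?_, by simp [hus, List.count_cons], by simp [pvWild]⟩
        · simp [hout, hl.1]
        · simp [List.contains_cons, hl.2.1, hpct]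
    · have hb1 : (ch == '_') = false := by simp [hu]
      have hb2 : (ch == '%') = false := by simp [hp]
      rw [sA_lit _ _ _ _ hb1 hb2, sB_lit _ _ _ _ _ hb1 hb2]
      cases is_wild with
      | true =>
        obtain ⟨hiw, hne, hout, hpct, hus, hall⟩ := h
        subst hiw
        have hw := canon_of_wild curr hne hall
        refine ⟨rfl, by simp, ?_, rfl, rfl, ?_⟩
        · simp [hout, hw, hpct, hus]
        · simp [pvWild, hb1, hb2]
      | false =>
        obtain ⟨hiw, hne, hout, hpct, hus, hall⟩ := h
        subst hiw
        refine ⟨rfl, by simp, ?_, hpct, hus, ?_⟩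
        · simp [hout]
        · simp only [List.all_append, Bool.and_eq_true]
          refine ⟨hall, ?_⟩
          simp [pvWild, hb1, hb2]

lemma rel_foldl (l : List Char) (sA : List (List Char) × Bool × List Char)
    (sB : List (List Char) × Bool × Nat × Bool) (h : pvRel sA sB) :
    pvRel (l.foldl pvStepA sA) (l.foldl pvStepB sB) := by
  induction l generalizing sA sB with
  | nil => exact h
  | cons c l ih => exact ih _ _ (rel_step _ _ _ h)

lemma contains_canon_wild (pct : Bool) (us : Nat) :
    ((if pct then ['%'] else []) ++ List.replicate us '_').contains '%' = pct := by
  cases pct <;> simp [List.contains_append]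

lemma final_assemble (flip : Bool) (parsed : List (List Char)) (is_wild : Bool) (curr : List Char)
    (out : List (List Char)) (pct : Bool) (us : Nat) (in_wild : Bool)
    (h : pvRel (parsed, is_wild, curr) (out, pct, us, in_wild)) :
    (let out_tokens := (if (false : Bool) then
        ((parsed ++ [curr]).foldl (fun acc token =>
          if token.contains '%' || token.contains '_' then acc ++ [token]
          else acc ++ token.map (fun ch => [ch])) [])
      else (parsed ++ [curr])).foldl pvCanonStep [];
     let out_tokens := if flip && (out_tokens.getLastD []).contains '%' then
        out_tokens.dropLast ++ [List.replicate ((out_tokens.getLastD []).length - 1) '_' ++ ['%']]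
       else out_tokens;
     String.mk out_tokens.flatten) =
    (let out2 := if in_wild then
        (if flip && pct then out ++ [List.replicate us '_' ++ ['%']]
         else out ++ [(if pct then ['%'] else []) ++ List.replicate us '_'])
      else out;
     String.mk out2.flatten) := by
  simp only [Bool.false_eq_true, if_false, canon_foldl, List.nil_append, List.map_append,
    List.map_cons, List.map_nil]
  cases is_wild with
  | false =>
    obtain ⟨hiw, hne, hout, hpct, hus, hall⟩ := h
    subst hiw
    have hl := canon_of_lit curr hall
    simp only [hl.1, List.getLastD_concat, hl.2.1, Bool.and_false, Bool.false_eq_true, if_false]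
    simp [hout]
  | true =>
    obtain ⟨hiw, hne, hout, hpct, hus, hall⟩ := h
    subst hiw
    have hw := canon_of_wild curr hne hall
    rw [← hpct, ← hus] at hw
    simp only [hw, List.getLastD_concat, contains_canon_wild]
    cases pct with
    | false =>
      simp [hout]
    | true =>
      cases flip with
      | false => simp [hout]
      | true =>
        simp only [Bool.and_true, Bool.true_and, if_true, List.dropLast_concat]
        have hlen : (((if (true : Bool) then ['%'] else []) ++ List.replicate us '_').length - 1) = us := by
          simp
        simp [hout, hlen]

-- ===== VERDICT (by name: the statement is the Claim_ definition above) =====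
theorem canonicalize_like_query_spec : Claim_equal_canonicalize_like_query := by
  intro qry is_last_flip _dom hpre
  unfold Spec_canonicalize_like_query
  have hnil : qry.toList ≠ [] := by
    intro h
    exact hpre (by rw [← String.ofList_toList (s := qry), h])
  obtain ⟨c, rest, hq⟩ := List.exists_cons_of_ne_nil hnil
  unfold canonicalize_like_query canonicalize_like_query_alt parse_like_query
  rw [hq]
  have hinit : pvRel ([], (c == '_' || c == '%'), [c]) (pvStepB ([], false, 0, false) c) := by
    by_cases hp : c = '%'
    · subst hp; rw [sB_pct]; simp [pvRel, pvWild]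
    · by_cases hu : c = '_'
      · subst hu; rw [sB_us]; simp [pvRel, hp, List.count_cons, pvWild]
      · have hb1 : (c == '_') = false := by simp [hu]
        have hb2 : (c == '%') = false := by simp [hp]
        rw [sB_lit _ _ _ _ _ hb1 hb2]
        simp [pvRel, hb1, hb2, pvWild]
  have hrel := rel_foldl rest _ _ hinit
  simp only [List.foldl_cons]
  exact final_assemble is_last_flip _ _ _ _ _ _ _ (by exact hrel)
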